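-- pv_equiv track=rewrite | github.com/ferhatelmas/algo | leetcode/algorithms/medium/arithmetic_subarrays.py | isArithmetic
-- ===== SOURCE A (Python) =====
-- from typing import List
--
-- def isArithmetic(nums: List[int]) -> bool:
--     i, l = 1, len(nums) - 1
--     if l < 2:
--         return True
--     diff = nums[0] - nums[i]
--     while i < l:
--         if diff != nums[i] - nums[i + 1]:
--             return False
--         i += 1
--     return True
-- ===== SOURCE B (Python) =====
-- from typing import List
--
-- def isArithmetic(nums: List[int]) -> bool:
--     if len(nums) < 3:
--         return True
--     d = nums[1] - nums[0]
--     return all(nums[i] == nums[0] + i * d for i in range(len(nums)))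
-- ===== Notes on version B (the rewrite author's own statement) =====
-- stated objective: simpler
-- what changed: Replaces the index-tracked while loop comparing neighbouring differences with a closed-form check that each element equals nums[0] + i*(nums[1]-nums[0]).
import Mathlib
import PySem

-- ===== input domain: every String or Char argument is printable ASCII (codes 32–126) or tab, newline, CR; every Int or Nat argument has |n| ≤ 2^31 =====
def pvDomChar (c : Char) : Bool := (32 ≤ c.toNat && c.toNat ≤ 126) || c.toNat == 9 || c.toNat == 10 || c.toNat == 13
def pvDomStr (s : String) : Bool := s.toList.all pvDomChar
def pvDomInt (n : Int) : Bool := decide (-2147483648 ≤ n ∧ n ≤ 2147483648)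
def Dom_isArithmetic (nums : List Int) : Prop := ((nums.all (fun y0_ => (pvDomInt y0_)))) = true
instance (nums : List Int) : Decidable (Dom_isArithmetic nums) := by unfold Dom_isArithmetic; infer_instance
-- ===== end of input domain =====

-- B replaces A's neighbour-difference while loop by a position-indexed closed-form check
-- nums[i] == nums[0] + i*d (objective: simpler).


-- ===== PORT A =====
-- A's while loop; all indices used are in range, so List.getD is exact Python indexing here.
def isArithmeticLoop (nums : List Int) (diff : Int) (i l : Nat) : Bool :=
  if i < l then
    if diff ≠ nums.getD i 0 - nums.getD (i + 1) 0 then false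
    else isArithmeticLoop nums diff (i + 1) l
  else true
termination_by l - i

def isArithmetic (nums : List Int) : Bool :=
  let l : Int := (nums.length : Int) - 1
  if l < 2 then true
  else isArithmeticLoop nums (nums.getD 0 0 - nums.getD 1 0) 1 (nums.length - 1)

-- ===== PORT B =====
def isArithmetic_alt (nums : List Int) : Bool :=
  if nums.length < 3 then true
  else
    let d := nums.getD 1 0 - nums.getD 0 0
    (List.range nums.length).all (fun i => nums.getD i 0 == nums.getD 0 0 + (i : Int) * d)

-- ===== PRECONDITION & SPEC =====
def Spec_isArithmetic (nums : List Int) (out : Bool) : Prop := out = isArithmetic_alt nums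
instance (nums : List Int) (out : Bool) : Decidable (Spec_isArithmetic nums out) := by unfold Spec_isArithmetic; infer_instance

-- ===== CLAIM (what is proved, stated in full; the proofs are below) =====
def Claim_equal_isArithmetic : Prop := ∀ (nums : List Int), Dom_isArithmetic nums → Spec_isArithmetic nums (isArithmetic nums)

-- ===== LEMMAS AND PROOFS =====

lemma loop_iff (nums : List Int) (d : Int) :
    ∀ k i l, l ≤ i + k →
      (isArithmeticLoop nums d i l = true ↔
        ∀ j, i ≤ j → j < l → d = nums.getD j 0 - nums.getD (j + 1) 0) := by
  intro k
  induction k with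
  | zero =>
    intro i l hl
    rw [isArithmeticLoop]
    simp only [if_neg (by omega : ¬ i < l)]
    constructor
    · intro _ j hij hjl; omega
    · intro _; trivial
  | succ k ih =>
    intro i l hl
    rw [isArithmeticLoop]
    by_cases h : i < l
    · simp only [if_pos h]
      by_cases hd : d ≠ nums.getD i 0 - nums.getD (i + 1) 0
      · simp only [if_pos hd]
        constructor
        · intro hfalse; cases hfalse
        · intro hall; exact absurd (hall i le_rfl h) hd
      · simp only [if_neg hd]
        push_neg at hd
        rw [ih (i + 1) l (by omega)]
        constructor
        · intro hall j hij hjl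
          rcases Nat.eq_or_lt_of_le hij with rfl | hlt
          · exact hd
          · exact hall j hlt hjl
        · intro hall j hij hjl; exact hall j (by omega) hjl
    · simp only [if_neg h]
      constructor
      · intro _ j hij hjl; omega
      · intro _; trivial

lemma closed_iff_step (nums : List Int) (hn : 3 ≤ nums.length) :
    ((∀ j < nums.length, nums.getD j 0 = nums.getD 0 0 + (j : Int) * (nums.getD 1 0 - nums.getD 0 0)) ↔
      (∀ j, j + 1 < nums.length → nums.getD (j + 1) 0 - nums.getD j 0 = nums.getD 1 0 - nums.getD 0 0)) := by
  constructor
  · intro h j hj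
    have h1 := h j (by omega)
    have h2 := h (j + 1) hj
    rw [h1, h2]; push_cast; ring
  · intro h j
    induction j with
    | zero => intro _; simp
    | succ j ihj =>
      intro hj
      have := h j (by omega)
      have := ihj (by omega)
      push_cast
      push_cast at this ⊢
      linarith [h j (by omega), ihj (by omega)]

-- ===== VERDICT (by name: the statement is the Claim_ definition above) =====
theorem isArithmetic_spec : Claim_equal_isArithmetic := by
  intro nums _
  unfold Spec_isArithmetic isArithmetic isArithmetic_alt
  by_cases hn : nums.length < 3
  · simp only [if_pos (by push_cast; omega : ((nums.length : Int) - 1) < 2), if_pos hn]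
  · push_neg at hn
    simp only [if_neg (by push_cast; omega : ¬ ((nums.length : Int) - 1) < 2),
      if_neg (by omega : ¬ nums.length < 3)]
    have hA := loop_iff nums (nums.getD 0 0 - nums.getD 1 0) (nums.length - 1) 1 (nums.length - 1) (by omega)
    have hB : ((List.range nums.length).all
        (fun i => nums.getD i 0 == nums.getD 0 0 + (i : Int) * (nums.getD 1 0 - nums.getD 0 0)) = true) ↔
        (∀ j < nums.length, nums.getD j 0 = nums.getD 0 0 + (j : Int) * (nums.getD 1 0 - nums.getD 0 0)) := by
      simp [List.all_eq_true, List.mem_range]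
    have key : (isArithmeticLoop nums (nums.getD 0 0 - nums.getD 1 0) 1 (nums.length - 1) = true) ↔
        ((List.range nums.length).all
          (fun i => nums.getD i 0 == nums.getD 0 0 + (i : Int) * (nums.getD 1 0 - nums.getD 0 0)) = true) := by
      rw [hA, hB, closed_iff_step nums hn]
      constructor
      · intro h j hj
        rcases Nat.eq_zero_or_pos j with rfl | hpos
        · ring
        · have := h j hpos (by omega)
          linarith
      · intro h j hj1 hjl
        have := h j (by omega)
        linarith
    rcases Bool.eq_false_or_eq_true (isArithmeticLoop nums (nums.getD 0 0 - nums.getD 1 0) 1 (nums.length - 1)) with h | h <;>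
      rcases Bool.eq_false_or_eq_true ((List.range nums.length).all
        (fun i => nums.getD i 0 == nums.getD 0 0 + (i : Int) * (nums.getD 1 0 - nums.getD 0 0))) with h2 | h2 <;>
      simp_all
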